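-- pv_equiv track=rewrite | github.com/SharadVenkateswaran/CSE130 | PA5/pa5_solution/crack.py | transform_capitalize
-- ===== SOURCE A (Python) =====
-- def transform_capitalize(str):
--     """Return an array containing all possible ways to capitalize the string
--        List comprehensions iteratively generate capitalization combinations"""
--
--     myList = [""]
--     for c in str:
--         if c.lower() == c.upper():
--             myList = [x + c for x in myList]
--         else:
--             myList = [x + c.lower() for x in myList] + [x + c.upper() for x in myList]
--
--     return myList
-- ===== SOURCE B (Python) =====
-- def transform_capitalize(str):
--     """Recursive: prefix each case variant of the first character to every
--     capitalization of the rest (variants vary fastest, matching A's order)."""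
--     if not str:
--         return [""]
--     c = str[0]
--     variants = [c] if c.lower() == c.upper() else [c.lower(), c.upper()]
--     return [v + rest for rest in transform_capitalize(str[1:]) for v in variants]
-- ===== Notes on version B (the rewrite author's own statement) =====
-- stated objective: simpler
-- what changed: Replaces A's iterative list-doubling that appends each character's case variants at the right end of every accumulated prefix with a structural recursion that prepends the first character's case variants to each capitalization of the rest, in one comprehension.
import Mathlib
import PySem

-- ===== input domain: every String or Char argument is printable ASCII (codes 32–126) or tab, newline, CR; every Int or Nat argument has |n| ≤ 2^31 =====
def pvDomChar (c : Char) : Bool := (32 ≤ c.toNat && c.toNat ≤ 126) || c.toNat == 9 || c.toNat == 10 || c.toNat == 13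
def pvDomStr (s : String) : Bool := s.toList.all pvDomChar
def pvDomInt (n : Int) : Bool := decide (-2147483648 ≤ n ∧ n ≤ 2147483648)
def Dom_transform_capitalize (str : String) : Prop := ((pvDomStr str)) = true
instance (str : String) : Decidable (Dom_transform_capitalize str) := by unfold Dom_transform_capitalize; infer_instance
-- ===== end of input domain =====

-- B: recursion prepending the first character's case variants, instead of A's iterative list-doubling (alternative decomposition; same cost).


-- ===== PORT A =====
-- literal transliteration of A: fold over the characters, doubling the list at each cased character
def transform_capitalize (str : String) : List String :=
  str.toList.foldl (fun myList c =>
    if PySem.Chars.lowerChar c == PySem.Chars.upperChar c then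
      myList.map (fun x => x ++ String.mk [c])
    else
      myList.map (fun x => x ++ String.mk [PySem.Chars.lowerChar c]) ++
      myList.map (fun x => x ++ String.mk [PySem.Chars.upperChar c])) [""]

-- ===== PORT B =====
-- transliteration of Source B's recursion: str[0] / str[1:] become head / tail of the char list
def altGo : List Char → List String
  | [] => [""]
  | c :: rest =>
    let variants : List String :=
      if PySem.Chars.lowerChar c == PySem.Chars.upperChar c then [String.mk [c]]
      else [String.mk [PySem.Chars.lowerChar c], String.mk [PySem.Chars.upperChar c]]
    (altGo rest).flatMap (fun r => variants.map (fun v => v ++ r))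

def transform_capitalize_alt (str : String) : List String := altGo str.toList

-- ===== PRECONDITION & SPEC =====
def Spec_transform_capitalize (str : String) (out : List String) : Prop := out = transform_capitalize_alt str
instance (str : String) (out : List String) : Decidable (Spec_transform_capitalize str out) := by unfold Spec_transform_capitalize; infer_instance

-- ===== CLAIM (what is proved, stated in full; the proofs are below) =====
def Claim_equal_transform_capitalize : Prop := ∀ (str : String), Dom_transform_capitalize str → Spec_transform_capitalize str (transform_capitalize str)

-- ===== LEMMAS AND PROOFS =====

-- A's loop body as a function, to reason about the fold
def stepA (myList : List String) (c : Char) : List String :=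
  if PySem.Chars.lowerChar c == PySem.Chars.upperChar c then
    myList.map (fun x => x ++ String.mk [c])
  else
    myList.map (fun x => x ++ String.mk [PySem.Chars.lowerChar c]) ++
    myList.map (fun x => x ++ String.mk [PySem.Chars.upperChar c])

theorem altGo_snoc (cs : List Char) (c : Char) :
    altGo (cs ++ [c]) = stepA (altGo cs) c := by
  induction cs with
  | nil =>
    simp [altGo, stepA]
  | cons c' cs ih =>
    simp only [List.cons_append, altGo, ih, stepA]
    split <;> split <;> simp [List.flatMap_append, List.map_flatMap, List.flatMap_map, String.append_assoc]

theorem transform_capitalize_eq_alt (str : String) :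
    transform_capitalize str = transform_capitalize_alt str := by
  show str.toList.foldl stepA [""] = altGo str.toList
  induction str.toList using List.reverseRecOn with
  | nil => rfl
  | append_singleton cs c ih => rw [List.foldl_append, altGo_snoc, ih]; rfl

-- ===== VERDICT (by name: the statement is the Claim_ definition above) =====
theorem transform_capitalize_spec : Claim_equal_transform_capitalize := by
  intro str _
  exact transform_capitalize_eq_alt str
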